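-- pv_equiv track=rewrite | github.com/FSund/adventofcode | 2025/03/star2_stack.py | make_largest_joltage
-- ===== SOURCE A (Python) =====
-- def make_largest_joltage(line: str, batteries_needed = 12) -> int:
--     """
--     turn on exactly batteries_needed batteries
--     """
--
--     n = len(line)
--     batteries = [int(line[0])]
--     for idx in range(1, n):
--         joltage = int(line[idx])
--         if joltage > batteries[-1]:
--             while len(batteries) and joltage > batteries[-1] and (batteries_needed - len(batteries) < n - idx):
--                 batteries.pop()
--             batteries.append(joltage)
--         elif len(batteries) < batteries_needed:
--             batteries.append(joltage)
--
--     return int("".join(f"{j}" for j in batteries))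
-- ===== SOURCE B (Python) =====
-- def make_largest_joltage(line: str, batteries_needed = 12) -> int:
--     """
--     turn on exactly batteries_needed batteries
--     """
--     n = len(line)
--     k = min(n, max(batteries_needed, 1))
--
--     def pick(s, k):
--         # choose the lexicographically largest k-digit subsequence of s
--         if k == 0:
--             return ''
--         window = s[:len(s) - k + 1]
--         c = max(window)
--         i = window.index(c)
--         return c + pick(s[i + 1:], k - 1)
--
--     return int(pick(line, k))
-- ===== Notes on version B (the rewrite author's own statement) =====
-- stated objective: alternative
-- what changed: Replaces the single-pass stack (push/pop with a remaining-capacity guard) by a recursive window-max greedy: repeatedly take the leftmost maximum digit of the feasible window and recurse on the remainder with one battery fewer.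
import Mathlib
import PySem

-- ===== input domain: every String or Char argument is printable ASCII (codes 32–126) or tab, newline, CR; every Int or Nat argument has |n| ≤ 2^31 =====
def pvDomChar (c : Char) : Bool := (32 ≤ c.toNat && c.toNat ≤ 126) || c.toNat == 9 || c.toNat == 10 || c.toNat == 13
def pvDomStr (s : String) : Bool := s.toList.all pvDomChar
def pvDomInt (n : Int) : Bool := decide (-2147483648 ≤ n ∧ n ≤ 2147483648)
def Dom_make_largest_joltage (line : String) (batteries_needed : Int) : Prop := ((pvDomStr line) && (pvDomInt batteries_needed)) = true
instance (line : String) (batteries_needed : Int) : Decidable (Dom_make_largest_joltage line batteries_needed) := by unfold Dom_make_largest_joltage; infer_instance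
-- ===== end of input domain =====

-- B replaces A's one-pass stack selection by a recursive leftmost-window-max greedy
-- (alternative decomposition, same return value on every non-raising input).


-- ===== PORT A =====
-- the inner `while len(batteries) and joltage > batteries[-1] and (batteries_needed - len(batteries) < n - idx): batteries.pop()`
def aPop (bn n idx j : Int) (bs : List Int) : List Int :=
  match _hL : bs.getLast? with
  | some t =>
    if j > t ∧ bn - (bs.length : Int) < n - idx then
      aPop bn n idx j bs.dropLast
    else bs
  | none => bs
termination_by bs.length
decreasing_by
  have hne : bs ≠ [] := by intro he; subst he; simp at _hL
  have h1 : bs.dropLast.length = bs.length - 1 := List.length_dropLast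
  have h2 : 0 < bs.length := List.length_pos_of_ne_nil hne
  omega

-- one iteration of `for idx in range(1, n)` (Python never sees an empty stack here;
-- the `none` branch is the literal reading of `batteries[-1]` on the stack as built)
def aStep (bn n idx : Int) (bs : List Int) (j : Int) : List Int :=
  match bs.getLast? with
  | some t =>
    if j > t then aPop bn n idx j bs ++ [j]
    else if (bs.length : Int) < bn then bs ++ [j] else bs
  | none => bs ++ [j]

-- `for idx in range(1, n)`: the Option threads the possible ValueError of `int(line[idx])`
def aLoop (cs : List Char) (bn n idx : Int) (acc : Option (List Int)) : Option (List Int) :=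
  if _h : idx < n then
    aLoop cs bn n (idx + 1)
      (acc.bind fun bs =>
        (PySem.List.pyGet? cs idx).bind fun c =>
        (PySem.Int.ofChars? [c]).map fun j => aStep bn n idx bs j)
  else acc
termination_by (n - idx).toNat
decreasing_by omega

def make_largest_joltage (line : String) (batteries_needed : Int) : Int :=
  let cs := line.toList
  let n : Int := cs.length
  let r : Option Int :=
    ((PySem.List.pyGet? cs 0).bind fun c0 =>          -- line[0]  (IndexError on '')
     (PySem.Int.ofChars? [c0]).bind fun j0 =>         -- int(line[0])
     aLoop cs batteries_needed n 1 (some [j0])).bind fun bs =>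
      PySem.Int.ofChars? (PySem.Chars.join [] (bs.map PySem.Int.toChars))  -- int("".join(f"{j}" …))
  r.getD 0  -- unreachable inside Pre_ (A raises exactly outside Pre_)

-- ===== PORT B =====
-- `pick(s, k)`: leftmost maximum of the feasible window, then recurse; Option threads
-- the ValueError of `max('')` (reachable only on the empty line, outside Pre_)
def bPick (s : List Char) (k : Nat) : Option (List Char) :=
  if k = 0 then some [] else
    let window := PySem.List.slice s none (some ((s.length : Int) - (k : Int) + 1))  -- s[:len(s)-k+1]
    (PySem.List.max? window (fun c => c)).bind fun c =>                              -- max(window)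
    (PySem.List.index? window c).bind fun i =>                                       -- window.index(c)
    (bPick (PySem.List.slice s (some ((i : Int) + 1)) none) (k - 1)).map fun rest => -- pick(s[i+1:], k-1)
      c :: rest
termination_by k

def make_largest_joltage_alt (line : String) (batteries_needed : Int) : Int :=
  let cs := line.toList
  let n : Int := cs.length
  let k : Int := min n (max batteries_needed 1)
  (((bPick cs k.toNat).bind fun ds => PySem.Int.ofChars? ds)).getD 0  -- int(pick(line, k)); getD unreachable inside Pre_

-- ===== PRECONDITION & SPEC =====
-- Pre_ excludes exactly the inputs where A raises: the empty line (IndexError on line[0])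
-- and lines with a non-digit character (ValueError in int(line[idx])).
def isAsciiDigit (c : Char) : Bool := 48 ≤ c.toNat && c.toNat ≤ 57
def Pre_make_largest_joltage (line : String) (batteries_needed : Int) : Prop :=
  line.toList ≠ [] ∧ line.toList.all isAsciiDigit = true
instance (line : String) (batteries_needed : Int) : Decidable (Pre_make_largest_joltage line batteries_needed) := by unfold Pre_make_largest_joltage; infer_instance

def pvWitness_make_largest_joltage : String × Int := ("2340912", 3)

def Spec_make_largest_joltage (line : String) (batteries_needed : Int) (out : Int) : Prop := out = make_largest_joltage_alt line batteries_needed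
instance (line : String) (batteries_needed : Int) (out : Int) : Decidable (Spec_make_largest_joltage line batteries_needed out) := by unfold Spec_make_largest_joltage; infer_instance

-- ===== CLAIM (what is proved, stated in full; the proofs are below) =====
def Claim_equal_make_largest_joltage : Prop := ∀ (line : String) (batteries_needed : Int), Dom_make_largest_joltage line batteries_needed → Pre_make_largest_joltage line batteries_needed → Spec_make_largest_joltage line batteries_needed (make_largest_joltage line batteries_needed)

-- ===== LEMMAS AND PROOFS =====

-- digit value of a char
def dv (c : Char) : Int := (c.toNat : Int) - 48

-- clean char-level stack algorithm (stack reversed: head = top); k = effective capacity,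
-- rl = number of characters after the current one
def cpop (k rl : Nat) (c : Char) : List Char → List Char
  | [] => []
  | t :: r => if t < c ∧ k ≤ r.length + 1 + rl then cpop k rl c r else t :: r

def cstep (k rl : Nat) (st : List Char) (c : Char) : List Char :=
  match st with
  | [] => if 0 < k then [c] else []
  | t :: _ => if t < c then c :: cpop k rl c st
              else if st.length < k then c :: st else st

-- run with an extra offset e added to every rest length (crunE k 0 = the real run)
def crunE (k e : Nat) (st : List Char) : List Char → List Char
  | [] => st
  | c :: r => crunE k e (cstep k (r.length + e) st c) r

-- clean greedy (mirrors bPick, total)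
def greedy (k : Nat) (s : List Char) : List Char :=
  match k with
  | 0 => []
  | k' + 1 =>
    let w := s.take (s.length - k')
    match PySem.List.max? w (fun c => c) with
    | none => []
    | some m =>
      match PySem.List.index? w m with
      | none => []
      | some j => m :: greedy k' (s.drop (j + 1))

-- --- generic facts ---

lemma dv_lt_iff (a b : Char) : dv a < dv b ↔ a < b := by
  rw [Char.lt_def, UInt32.lt_iff_toNat_lt]
  unfold dv Char.toNat
  omega

lemma digit_cases (c : Char) (h : isAsciiDigit c = true) :
    c ∈ ['0','1','2','3','4','5','6','7','8','9'] := by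
  rw [isAsciiDigit, Bool.and_eq_true, decide_eq_true_iff, decide_eq_true_iff] at h
  have hv : c = Char.ofNat c.toNat := (Char.ofNat_toNat c).symm
  obtain ⟨hb1, hb2⟩ := h
  interval_cases hn : c.toNat <;> rw [hv] <;> decide

lemma ofChars_digit (c : Char) (h : isAsciiDigit c = true) :
    PySem.Int.ofChars? [c] = some (dv c) := by
  have := digit_cases c h
  fin_cases this <;> decide

lemma toChars_digit (c : Char) (h : isAsciiDigit c = true) :
    PySem.Int.toChars (dv c) = [c] := by
  have := digit_cases c h
  fin_cases this <;> decide

-- --- clean stack run: structural facts ---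

lemma cpop_subset {k rl : Nat} {c x : Char} {st : List Char}
    (h : x ∈ cpop k rl c st) : x ∈ st := by
  induction st with
  | nil => simp [cpop] at h
  | cons t r ih =>
    rw [cpop] at h
    split at h
    · exact List.mem_cons_of_mem _ (ih h)
    · exact h

lemma cstep_mem {k rl : Nat} {st : List Char} {c x : Char}
    (h : x ∈ cstep k rl st c) : x = c ∨ x ∈ st := by
  match st with
  | [] =>
    rw [cstep] at h
    split at h <;> simp_all
  | t :: r =>
    rw [cstep] at h
    split at h
    · rcases List.mem_cons.mp h with h' | h'
      · exact Or.inl h'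
      · exact Or.inr (cpop_subset h')
    split at h
    · exact List.mem_cons.mp h
    · exact Or.inr h

lemma crunE_mem {k e : Nat} {x : Char} : ∀ {l st : List Char},
    x ∈ crunE k e st l → x ∈ st ∨ x ∈ l := by
  intro l
  induction l with
  | nil => intro st h; exact Or.inl (by simpa [crunE] using h)
  | cons c r ih =>
    intro st h
    rw [crunE] at h
    rcases ih h with hs | hr
    · rcases cstep_mem hs with h' | h'
      · exact Or.inr (by simp [h'])
      · exact Or.inl h'
    · exact Or.inr (List.mem_cons_of_mem _ hr)

lemma cstep_ne_nil {k rl : Nat} {st : List Char} {c : Char} (h : st ≠ []) :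
    cstep k rl st c ≠ [] := by
  match st with
  | [] => exact absurd rfl h
  | t :: r =>
    rw [cstep]
    split
    · simp
    split
    · simp
    · simp

lemma cpop_all {k rl : Nat} {c : Char} {st : List Char}
    (hall : ∀ x ∈ st, x < c) (hk : k ≤ 1 + rl) : cpop k rl c st = [] := by
  induction st with
  | nil => rfl
  | cons t r ih =>
    rw [cpop, if_pos ⟨hall t (by simp), by omega⟩]
    exact ih (fun x hx => hall x (List.mem_cons_of_mem _ hx))

lemma cstep_all {k rl : Nat} {c : Char} {st : List Char}
    (hall : ∀ x ∈ st, x < c) (hk : k ≤ 1 + rl) (hk1 : 0 < k) :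
    cstep k rl st c = [c] := by
  match st with
  | [] => rw [cstep, if_pos hk1]
  | t :: r =>
    rw [cstep, if_pos (hall t (by simp)), cpop_all hall hk]

lemma crunE_append (k e : Nat) (p q : List Char) : ∀ st,
    crunE k e st (p ++ q) = crunE k e (crunE k (q.length + e) st p) q := by
  induction p with
  | nil => intro st; simp [crunE]
  | cons c pr ih =>
    intro st
    simp only [List.cons_append, crunE, List.length_append]
    rw [← ih, Nat.add_assoc]

lemma crunE_zero_nil (e : Nat) (l : List Char) : crunE 0 e [] l = [] := by
  induction l with
  | nil => rfl
  | cons c r ih => rw [crunE]; simpa [cstep] using ih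

lemma cstep_push {k rl : Nat} {st : List Char} {c : Char}
    (h : st.length + 1 + rl ≤ k) : cstep k rl st c = c :: st := by
  match st with
  | [] => rw [cstep, if_pos (by simp at h; omega)]
  | t :: r =>
    rw [cstep]
    split
    · rw [cpop, if_neg (by simp at h ⊢; omega)]
    · rw [if_pos (by simp at h ⊢; omega)]

lemma crun_full {k : Nat} : ∀ {l st : List Char},
    st.length + l.length ≤ k → crunE k 0 st l = l.reverse ++ st := by
  intro l
  induction l with
  | nil => intro st _; simp [crunE]
  | cons c r ih =>
    intro st h
    rw [crunE, cstep_push (by simp at h; omega)]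
    rw [ih (by simp at h ⊢; omega)]
    simp

-- --- bottom-of-stack preservation ---

lemma cpop_append {k rl : Nat} {c m : Char} (u : List Char)
    (hc : k + 1 ≤ 1 + rl → c ≤ m) :
    cpop (k+1) rl c (u ++ [m]) = cpop k rl c u ++ [m] := by
  induction u with
  | nil =>
    rw [List.nil_append]
    show cpop (k+1) rl c [m] = [] ++ [m]
    rw [cpop, if_neg, List.nil_append]
    rintro ⟨h1, h2⟩
    simp only [List.length_nil] at h2
    exact absurd h1 (not_lt.mpr (hc (by omega)))
  | cons t u' ih =>
    rw [List.cons_append, cpop, cpop]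
    by_cases hcond : t < c ∧ k ≤ u'.length + 1 + rl
    · obtain ⟨h1, h2⟩ := hcond
      rw [if_pos ⟨h1, by simp; omega⟩, if_pos ⟨h1, h2⟩, ih]
    · rw [if_neg (fun hx => hcond ⟨hx.1, by have := hx.2; simp at this; omega⟩),
        if_neg hcond, List.cons_append]

lemma cstep_append {k rl : Nat} {c m : Char} (u : List Char)
    (hc : k + 1 ≤ 1 + rl → c ≤ m) :
    cstep (k+1) rl (u ++ [m]) c = cstep k rl u c ++ [m] := by
  match u with
  | [] =>
    rw [List.nil_append, cstep, cstep]
    by_cases hmc : m < c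
    · have hrl : ¬ (k + 1 ≤ 1 + rl) := fun h => absurd hmc (not_lt.mpr (hc h))
      have hk0 : 0 < k := by omega
      rw [if_pos hmc, cpop, if_neg (fun hx => hrl (by have := hx.2; simp at this; omega)),
        if_pos hk0, List.cons_append, List.nil_append]
    · rw [if_neg hmc]
      by_cases hk0 : 0 < k
      · rw [if_pos (by simp; omega), if_pos hk0, List.cons_append, List.nil_append]
      · rw [if_neg (by simp; omega), if_neg hk0, List.nil_append]
  | t :: u' =>
    rw [List.cons_append, cstep, cstep]
    by_cases htc : t < c
    · rw [if_pos htc, if_pos htc, ← List.cons_append, cpop_append (t :: u') hc,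
        List.cons_append]
    · rw [if_neg htc, if_neg htc]
      by_cases hlen : (t :: u').length < k
      · rw [if_pos (by simp at hlen ⊢; omega), if_pos hlen, List.cons_append,
          List.cons_append]
      · rw [if_neg (by simp at hlen ⊢; omega), if_neg hlen, List.cons_append]

lemma crun_shift {k : Nat} {m : Char} : ∀ (l : List Char) (u : List Char),
    (∀ i (hi : i < l.length), k + 1 ≤ l.length - i → l[i] ≤ m) →
    crunE (k+1) 0 (u ++ [m]) l = crunE k 0 u l ++ [m] := by
  intro l
  induction l with
  | nil => intro u _; simp [crunE]
  | cons c r ih =>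
    intro u H
    rw [crunE, crunE]
    have hc : k + 1 ≤ 1 + (r.length + 0) → c ≤ m := by
      intro h
      have := H 0 (by simp) (by simp; omega)
      simpa using this
    rw [cstep_append u hc]
    exact ih _ (fun i hi hki => by
      have := H (i+1) (by simp; omega) (by simp at hki ⊢; omega)
      simpa using this)

-- --- greedy facts ---

lemma greedy_len : ∀ s : List Char, greedy s.length s = s := by
  intro s
  induction s with
  | nil => rfl
  | cons c r ih =>
    show greedy (r.length + 1) (c :: r) = c :: r
    rw [greedy]
    have hw : (c :: r).take ((c :: r).length - r.length) = [c] := by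
      simp
    rw [hw, PySem.List.max?_id_cons]
    simp only [List.foldl_nil]
    rw [PySem.List.index?_cons_self]
    simpa using ih

lemma stack_eq_greedy : ∀ (k : Nat) (s : List Char), k ≤ s.length →
    crunE k 0 [] s = (greedy k s).reverse := by
  intro k
  induction k with
  | zero => intro s _; rw [crunE_zero_nil]; rfl
  | succ k ih =>
    intro s hk
    have hwlen : (s.take (s.length - k)).length = s.length - k := by
      simp
    have hwne : s.take (s.length - k) ≠ [] := by
      intro he
      rw [he] at hwlen
      simp at hwlen
      omega
    obtain ⟨m, hmax⟩ : ∃ m, PySem.List.max? (s.take (s.length - k)) (fun c => c) = some m := by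
      cases hm : PySem.List.max? (s.take (s.length - k)) (fun c => c) with
      | none => exact absurd ((PySem.List.max?_eq_none_iff _ _).mp hm) hwne
      | some m => exact ⟨m, rfl⟩
    have hmem : m ∈ s.take (s.length - k) := PySem.List.max?_mem hmax
    have hmaxall : ∀ y ∈ s.take (s.length - k), y ≤ m := PySem.List.max?_isMax hmax
    obtain ⟨j, hj⟩ : ∃ j, PySem.List.index? (s.take (s.length - k)) m = some j := by
      cases hidx : PySem.List.index? (s.take (s.length - k)) m with
      | none =>
        rw [PySem.List.index?_eq_idxOf?] at hidx
        exact absurd (List.idxOf?_eq_none_iff.mp hidx) (by simp [hmem])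
      | some j => exact ⟨j, rfl⟩
    obtain ⟨hjlt, hwj, hjfirst⟩ := PySem.List.getElem_of_index?_eq_some hj
    rw [hwlen] at hjlt
    have hjs : j < s.length := by omega
    have hsj : s[j] = m := by
      rw [← hwj]
      simp [List.getElem_take]
    -- decompose s and push the run through the prefix
    have hsplit : s = s.take (j+1) ++ s.drop (j+1) := (List.take_append_drop _ _).symm
    have htake : s.take (j+1) = s.take j ++ [m] := by
      rw [List.take_add_one]
      simp [List.getElem?_eq_getElem hjs, hsj]
    have hq : (s.drop (j+1)).length = s.length - j - 1 := by simp; omega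
    have hkq : k ≤ (s.drop (j+1)).length := by omega
    conv_lhs => rw [hsplit]
    rw [crunE_append, htake, crunE_append]
    -- the stack just before m consists of characters strictly below m
    have hSlt : ∀ x ∈ crunE (k+1) ([m].length + ((s.drop (j+1)).length + 0)) [] (s.take j),
        x < m := by
      intro x hx
      rcases crunE_mem hx with h' | h'
      · simp at h'
      · obtain ⟨i, hi, hxe⟩ := List.getElem_of_mem h'
        have hij : i < j := by simp at hi; omega
        have hiw : (s.take j)[i] = (s.take (s.length - k))[i]'(by omega) := by
          simp [List.getElem_take]
        have hne : x ≠ m := by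
          rw [← hxe, hiw]
          exact hjfirst i hij
        have hle : x ≤ m := by
          apply hmaxall
          rw [← hxe, hiw]
          exact List.getElem_mem _
        exact lt_of_le_of_ne hle hne
    -- m sweeps that stack away
    have hpop : crunE (k+1) ((s.drop (j+1)).length + 0)
        (crunE (k+1) ([m].length + ((s.drop (j+1)).length + 0)) [] (s.take j)) [m]
        = [m] := by
      rw [crunE]
      show cstep (k+1) ([].length + ((s.drop (j+1)).length + 0)) _ m = [m]
      rw [cstep_all hSlt (by simp; omega) (by omega)]
    rw [hpop]
    -- the bottom element m is never popped again
    have hshift : crunE (k+1) 0 ([] ++ [m]) (s.drop (j+1))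
        = crunE k 0 [] (s.drop (j+1)) ++ [m] := by
      apply crun_shift
      intro i hi hki
      rw [List.getElem_drop]
      have hiw : j + 1 + i < s.length - k := by omega
      have : s[j+1+i]'(by omega) = (s.take (s.length - k))[j+1+i]'(by omega) := by
        simp [List.getElem_take]
      rw [this]
      exact hmaxall _ (List.getElem_mem _)
    rw [show ([m] : List Char) = [] ++ [m] from rfl, hshift, ih _ hkq]
    -- fold the greedy step back up
    conv_rhs => rw [greedy]
    rw [hmax]
    rw [PySem.List.index?_eq_idxOf?] at hj
    simp [hj]

lemma stack_eq_greedy_min (k : Nat) (s : List Char) (_hk : 0 < k) :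
    crunE k 0 [] s = (greedy (min s.length k) s).reverse := by
  by_cases h : k ≤ s.length
  · rw [min_eq_right h]
    exact stack_eq_greedy k s h
  · rw [min_eq_left (by omega), greedy_len, crun_full (by simp; omega)]
    simp

lemma greedy_subset {k : Nat} {s : List Char} {x : Char}
    (h : x ∈ greedy (min s.length k) s) (hk0 : 0 < k) : x ∈ s := by
  have h' : x ∈ crunE k 0 [] s := by
    rw [stack_eq_greedy_min k s hk0]
    simpa using h
  rcases crunE_mem h' with h'' | h''
  · simp at h''
  · exact h''

-- --- bridge: port A = clean run (under the digit precondition) ---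

lemma bridge_pop (bn n idx : Int) (rl : Nat) (hidx : n - idx = (rl : Int) + 1) :
    ∀ (st : List Char) (c : Char),
    aPop bn n idx (dv c) ((st.map dv).reverse)
      = ((cpop (max bn 1).toNat rl c st).map dv).reverse := by
  intro st
  induction st with
  | nil => intro c; rw [aPop]; rfl
  | cons t r ih =>
    intro c
    have hKcases : (bn ≤ 1 ∧ (max bn 1).toNat = 1) ∨ (1 ≤ bn ∧ ((max bn 1).toNat : Int) = bn) := by
      rcases le_total bn 1 with h | h
      · exact Or.inl ⟨h, by rw [max_eq_right h]; rfl⟩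
      · exact Or.inr ⟨h, by rw [max_eq_left h, Int.toNat_of_nonneg (by omega)]⟩
    have hrev : ((t :: r).map dv).reverse = (r.map dv).reverse ++ [dv t] := by simp
    rw [hrev, aPop, List.getLast?_concat]
    simp only []
    have hlen : ((r.map dv).reverse ++ [dv t]).length = r.length + 1 := by simp
    by_cases hcond : t < c ∧ (max bn 1).toNat ≤ r.length + 1 + rl
    · rw [if_pos ⟨(dv_lt_iff t c).mpr hcond.1, by rw [hlen]; omega⟩,
        List.dropLast_concat, ih c, cpop, if_pos hcond]
    · rw [if_neg, cpop, if_neg hcond, hrev]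
      rintro ⟨h1, h2⟩
      rw [hlen] at h2
      exact hcond ⟨(dv_lt_iff t c).mp h1, by omega⟩

lemma bridge_step (bn n idx : Int) (rl : Nat) (hidx : n - idx = (rl : Int) + 1)
    (st : List Char) (c : Char) (hne : st ≠ []) :
    aStep bn n idx ((st.map dv).reverse) (dv c)
      = ((cstep (max bn 1).toNat rl st c).map dv).reverse := by
  match st with
  | [] => exact absurd rfl hne
  | t :: r =>
    have hKcases : (bn ≤ 1 ∧ (max bn 1).toNat = 1) ∨ (1 ≤ bn ∧ ((max bn 1).toNat : Int) = bn) := by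
      rcases le_total bn 1 with h | h
      · exact Or.inl ⟨h, by rw [max_eq_right h]; rfl⟩
      · exact Or.inr ⟨h, by rw [max_eq_left h, Int.toNat_of_nonneg (by omega)]⟩
    have hrev : ((t :: r).map dv).reverse = (r.map dv).reverse ++ [dv t] := by simp
    have hlen : ((r.map dv).reverse ++ [dv t]).length = r.length + 1 := by simp
    rw [hrev, aStep, List.getLast?_concat]
    simp only []
    by_cases htc : t < c
    · rw [if_pos ((dv_lt_iff t c).mpr htc), ← hrev, bridge_pop bn n idx rl hidx,
        cstep, if_pos htc]
      simp
    · rw [if_neg (fun h => htc ((dv_lt_iff t c).mp h)), cstep, if_neg htc]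
      by_cases hl : (t :: r).length < (max bn 1).toNat
      · rw [if_pos (by rw [hlen]; simp at hl; omega), if_pos hl]
        simp
      · rw [if_neg (by rw [hlen]; simp at hl; omega), if_neg hl, hrev]

lemma bridge_loop (bn : Int) (cs : List Char) : ∀ (l st : List Char),
    st ≠ [] → (∀ c ∈ l, isAsciiDigit c = true) → l.length ≤ cs.length →
    cs.drop (cs.length - l.length) = l →
    aLoop cs bn (cs.length : Int) ((cs.length - l.length : Nat) : Int)
        (some ((st.map dv).reverse))
      = some (((crunE (max bn 1).toNat 0 st l).map dv).reverse) := by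
  intro l
  induction l with
  | nil =>
    intro st _ _ _ _
    rw [aLoop, dif_neg (by simp), crunE]
  | cons c r ih =>
    intro st hne hdig hlen hdrop
    simp only [List.length_cons] at hlen hdrop
    have hm : cs.length - (c :: r).length = cs.length - (r.length + 1) := by simp
    rw [aLoop, dif_pos (by simp; omega)]
    have hget : PySem.List.pyGet? cs ((cs.length - (r.length + 1) : Nat) : Int) = some c := by
      rw [PySem.List.pyGet?_natCast]
      have h0 : (List.drop (cs.length - (r.length + 1)) cs)[0]? = cs[(cs.length - (r.length + 1)) + 0]? :=
        List.getElem?_drop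
      rw [hdrop] at h0
      simpa using h0.symm
    rw [hm]
    rw [hget]
    simp only [Option.bind_some]
    rw [ofChars_digit c (hdig c (by simp))]
    simp only [Option.map_some]
    rw [bridge_step bn (cs.length : Int) _ r.length (by omega) st c hne]
    have hidx1 : ((cs.length - (r.length + 1) : Nat) : Int) + 1
        = ((cs.length - r.length : Nat) : Int) := by omega
    have hdrop' : cs.drop (cs.length - r.length) = r := by
      have h1 : cs.length - r.length = (cs.length - (r.length + 1)) + 1 := by omega
      rw [h1, ← List.drop_drop, hdrop]
      rfl
    rw [hidx1, ih _ (cstep_ne_nil hne) (fun x hx => hdig x (by simp [hx])) (by omega) hdrop']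
    rw [crunE]
    simp

-- --- bridge: port B = clean greedy ---

lemma bridge_pick : ∀ (k : Nat) (s : List Char), k ≤ s.length →
    bPick s k = some (greedy k s) := by
  intro k
  induction k with
  | zero => intro s _; rw [bPick, greedy]; rfl
  | succ k ih =>
    intro s hk
    rw [bPick, if_neg (by omega)]
    have hcast : (s.length : Int) - (((k:Nat)+1 : Nat) : Int) + 1 = ((s.length - k : Nat) : Int) := by
      push_cast
      omega
    rw [hcast, PySem.List.slice_to_natCast]
    have hwlen : (s.take (s.length - k)).length = s.length - k := by simp
    have hwne : s.take (s.length - k) ≠ [] := by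
      intro he
      rw [he] at hwlen
      simp at hwlen
      omega
    obtain ⟨m, hmax⟩ : ∃ m, PySem.List.max? (s.take (s.length - k)) (fun c => c) = some m := by
      cases hm : PySem.List.max? (s.take (s.length - k)) (fun c => c) with
      | none => exact absurd ((PySem.List.max?_eq_none_iff _ _).mp hm) hwne
      | some m => exact ⟨m, rfl⟩
    have hmem : m ∈ s.take (s.length - k) := PySem.List.max?_mem hmax
    obtain ⟨j, hj⟩ : ∃ j, PySem.List.index? (s.take (s.length - k)) m = some j := by
      cases hidx : PySem.List.index? (s.take (s.length - k)) m with
      | none =>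
        rw [PySem.List.index?_eq_idxOf?] at hidx
        exact absurd (List.idxOf?_eq_none_iff.mp hidx) (by simp [hmem])
      | some j => exact ⟨j, rfl⟩
    obtain ⟨hjlt, hwj, hjfirst⟩ := PySem.List.getElem_of_index?_eq_some hj
    rw [hwlen] at hjlt
    simp only [hmax, Option.bind_some]
    rw [hj]
    simp only [Option.bind_some]
    have hcast2 : ((j:Int) + 1) = (((j+1 : Nat)) : Int) := by push_cast; ring
    rw [hcast2, PySem.List.slice_from_natCast]
    have hkd : k ≤ (s.drop (j+1)).length := by simp; omega
    rw [show k + 1 - 1 = k from rfl, ih _ hkd]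
    conv_rhs => rw [greedy]
    rw [hmax]
    rw [PySem.List.index?_eq_idxOf?] at hj
    simp [hj]

lemma join_digits : ∀ (G : List Char), (∀ c ∈ G, isAsciiDigit c = true) →
    PySem.Chars.join [] ((G.map dv).map PySem.Int.toChars) = G := by
  intro G hd
  have h1 : (G.map dv).map PySem.Int.toChars = G.map (fun c => [c]) := by
    rw [List.map_map]
    exact List.map_congr_left (fun c hc => toChars_digit c (hd c hc))
  rw [h1]
  exact PySem.Chars.join_nil_singletons G

-- ===== VERDICT (by name: the statement is the Claim_ definition above) =====
theorem make_largest_joltage_spec : Claim_equal_make_largest_joltage := by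
  intro line bn _hdom hpre
  obtain ⟨hne, hdigAll⟩ := hpre
  have hdig : ∀ c ∈ line.toList, isAsciiDigit c = true := by
    rw [List.all_eq_true] at hdigAll
    exact hdigAll
  unfold Spec_make_largest_joltage
  obtain ⟨c0, rest, hcs⟩ : ∃ c0 rest, line.toList = c0 :: rest := by
    cases h : line.toList with
    | nil => exact absurd h hne
    | cons a b => exact ⟨a, b, rfl⟩
  rw [hcs] at hdig
  have hK1 : 0 < (max bn 1).toNat := by
    have h1 : (1:Int) ≤ max bn 1 := le_max_right _ _
    omega
  -- the clean stack run equals the clean greedy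
  have hstart : crunE (max bn 1).toNat 0 [] (c0 :: rest)
      = crunE (max bn 1).toNat 0 [c0] rest := by
    rw [crunE, cstep, if_pos hK1]
  have hGdig : ∀ c ∈ greedy (min (c0 :: rest).length (max bn 1).toNat) (c0 :: rest),
      isAsciiDigit c = true :=
    fun c hc => hdig c (greedy_subset hc hK1)
  -- port A
  unfold make_largest_joltage
  simp only [hcs, PySem.List.pyGet?_zero_cons, Option.bind_some,
    ofChars_digit c0 (hdig c0 (by simp))]
  rw [show (1 : Int) = (((c0 :: rest).length - rest.length : Nat) : Int) by simp,
    show (some [dv c0] : Option (List Int)) = some (([c0].map dv).reverse) by simp,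
    bridge_loop bn (c0 :: rest) rest [c0] (by simp)
      (fun x hx => hdig x (by simp [hx])) (by simp) (by simp),
    ← hstart, stack_eq_greedy_min _ _ hK1]
  simp only [Option.bind_some]
  rw [show ((((greedy (min (c0 :: rest).length (max bn 1).toNat) (c0 :: rest)).reverse).map dv).reverse)
      = (greedy (min (c0 :: rest).length (max bn 1).toNat) (c0 :: rest)).map dv by simp,
    join_digits _ hGdig]
  -- port B
  unfold make_largest_joltage_alt
  simp only [hcs]
  rw [show (min ((c0 :: rest).length : Int) (max bn 1)).toNat
      = min (c0 :: rest).length (max bn 1).toNat by omega,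
    bridge_pick _ _ (min_le_left _ _)]
  rfl
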